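-- pv_equiv track=rewrite | github.com/vladiarosh/advent-of-code | advent_of_code_2024/2024_02.py | collect_safe_and_unsafe_reports
-- ===== SOURCE A (Python) =====
-- def collect_safe_and_unsafe_reports(unfiltered_report):
--     good_reports = []
--     bad_reports = []
--     for line in unfiltered_report:
--         uni_direction_state, no_out_of_bound_difference = check_report_safety(line)
--         if uni_direction_state and no_out_of_bound_difference is True:
--             good_reports.append(line)
--         else:
--             bad_reports.append(line)
--     return good_reports, bad_reports
--
-- def check_report_safety(report):
--     single_direction = True
--     nothing_out_of_bounds = True
--     ascending_counter = 0
--     descending_counter = 0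
--     out_of_bounds_counter = 0
--
--     for index, number in enumerate(report):
--         if index != 0:
--             difference = report[index] - report[index - 1]
--             if report[index] > report[index - 1]:
--                 ascending_counter += 1
--                 if difference < 1 or difference > 3:
--                     out_of_bounds_counter += 1
--             if report[index] < report[index - 1]:
--                 descending_counter += 1
--                 if abs(difference) < 1 or abs(difference) > 3:
--                     out_of_bounds_counter += 1
--             if difference == 0:
--                 out_of_bounds_counter += 1
--
--         if ascending_counter > 0 and descending_counter > 0:
--             single_direction = False
--         if out_of_bounds_counter > 0:
--             nothing_out_of_bounds = False
--     return single_direction, nothing_out_of_bounds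
-- ===== SOURCE B (Python) =====
-- def collect_safe_and_unsafe_reports(unfiltered_report):
--     def is_safe(report):
--         diffs = [b - a for a, b in zip(report, report[1:])]
--         return all(1 <= d <= 3 for d in diffs) or all(-3 <= d <= -1 for d in diffs)
--
--     good_reports = [line for line in unfiltered_report if is_safe(line)]
--     bad_reports = [line for line in unfiltered_report if not is_safe(line)]
--     return good_reports, bad_reports
-- ===== Notes on version B (the rewrite author's own statement) =====
-- stated objective: simpler
-- what changed: Replaces A's five-variable state machine (direction flags plus ascending/descending/out-of-bounds counters updated per index with explicit indexing) by a zip-built adjacent-difference list judged with two short-circuiting all() range scans, and expresses the good/bad partition as two comprehensions instead of an accumulator loop.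
import Mathlib
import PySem

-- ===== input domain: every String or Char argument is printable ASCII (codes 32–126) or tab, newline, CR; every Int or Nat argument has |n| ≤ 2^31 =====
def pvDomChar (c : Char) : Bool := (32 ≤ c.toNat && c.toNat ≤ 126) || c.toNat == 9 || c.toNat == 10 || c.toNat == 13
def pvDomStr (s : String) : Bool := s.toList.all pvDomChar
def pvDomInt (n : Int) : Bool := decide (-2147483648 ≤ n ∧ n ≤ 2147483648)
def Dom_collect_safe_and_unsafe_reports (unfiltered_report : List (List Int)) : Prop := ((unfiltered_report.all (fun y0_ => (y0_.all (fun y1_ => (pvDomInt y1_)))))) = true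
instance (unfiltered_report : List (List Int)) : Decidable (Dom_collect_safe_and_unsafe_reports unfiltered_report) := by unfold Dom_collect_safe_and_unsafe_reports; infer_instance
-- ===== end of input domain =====

-- B replaces A's five-variable counter/flag state machine by zip-built adjacent
-- differences judged with two range scans; objective: simpler.

-- ===== PORT A =====
-- one iteration of check_report_safety's loop (state = (single_direction,
-- nothing_out_of_bounds, ascending_counter, descending_counter, out_of_bounds_counter));
-- report[index] / report[index-1] are always in range, so pyGetD is exact here
def pvCheckStep (report : List Int) (s : Bool × Bool × Int × Int × Int)
    (p : Int × Int) : Bool × Bool × Int × Int × Int :=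
  let (sd, noob, asc, desc, oob) := s
  let (index, _number) := p
  let (asc, desc, oob) :=
    if index ≠ 0 then
      let difference := PySem.List.pyGetD report index 0 - PySem.List.pyGetD report (index - 1) 0
      let (asc, oob) :=
        if PySem.List.pyGetD report index 0 > PySem.List.pyGetD report (index - 1) 0 then
          (asc + 1, if difference < 1 ∨ difference > 3 then oob + 1 else oob)
        else (asc, oob)
      let (desc, oob) :=
        if PySem.List.pyGetD report index 0 < PySem.List.pyGetD report (index - 1) 0 then
          (desc + 1, if |difference| < 1 ∨ |difference| > 3 then oob + 1 else oob)
        else (desc, oob)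
      let oob := if difference = 0 then oob + 1 else oob
      (asc, desc, oob)
    else (asc, desc, oob)
  let sd := if asc > 0 ∧ desc > 0 then false else sd
  let noob := if oob > 0 then false else noob
  (sd, noob, asc, desc, oob)

def check_report_safety (report : List Int) : Bool × Bool :=
  let st := (PySem.List.enumerate report 0).foldl (pvCheckStep report) (true, true, 0, 0, 0)
  (st.1, st.2.1)

def collect_safe_and_unsafe_reports (unfiltered_report : List (List Int)) :
    List (List Int) × List (List Int) :=
  unfiltered_report.foldl
    (fun acc line =>
      let r := check_report_safety line
      if r.1 && r.2 then (acc.1 ++ [line], acc.2) else (acc.1, acc.2 ++ [line]))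
    ([], [])

-- ===== PORT B =====
def pvAltSafe (report : List Int) : Bool :=
  let diffs := List.zipWith (fun a b => b - a) report report.tail
  (diffs.all fun d => decide (1 ≤ d ∧ d ≤ 3)) || (diffs.all fun d => decide (-3 ≤ d ∧ d ≤ -1))

def collect_safe_and_unsafe_reports_alt (unfiltered_report : List (List Int)) :
    List (List Int) × List (List Int) :=
  (unfiltered_report.filter pvAltSafe, unfiltered_report.filter (fun r => !pvAltSafe r))

-- ===== PRECONDITION & SPEC =====
def Spec_collect_safe_and_unsafe_reports (unfiltered_report : List (List Int)) (out : List (List Int) × List (List Int)) : Prop := out = collect_safe_and_unsafe_reports_alt unfiltered_report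
instance (unfiltered_report : List (List Int)) (out : List (List Int) × List (List Int)) : Decidable (Spec_collect_safe_and_unsafe_reports unfiltered_report out) := by unfold Spec_collect_safe_and_unsafe_reports; infer_instance

-- ===== CLAIM (what is proved, stated in full; the proofs are below) =====
def Claim_equal_collect_safe_and_unsafe_reports : Prop := ∀ (unfiltered_report : List (List Int)), Dom_collect_safe_and_unsafe_reports unfiltered_report → Spec_collect_safe_and_unsafe_reports unfiltered_report (collect_safe_and_unsafe_reports unfiltered_report)

-- ===== LEMMAS AND PROOFS =====

-- index-free rendering of A's loop step (difference = x - prev)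
def pvCoreStep (prev x : Int) (s : Bool × Bool × Int × Int × Int) :
    Bool × Bool × Int × Int × Int :=
  let (sd, noob, asc, desc, oob) := s
  let difference := x - prev
  let (asc, oob) :=
    if x > prev then (asc + 1, if difference < 1 ∨ difference > 3 then oob + 1 else oob)
    else (asc, oob)
  let (desc, oob) :=
    if x < prev then (desc + 1, if |difference| < 1 ∨ |difference| > 3 then oob + 1 else oob)
    else (desc, oob)
  let oob := if difference = 0 then oob + 1 else oob
  let sd := if asc > 0 ∧ desc > 0 then false else sd
  let noob := if oob > 0 then false else noob
  (sd, noob, asc, desc, oob)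

def pvCore : Int → List Int → (Bool × Bool × Int × Int × Int) → Bool × Bool × Int × Int × Int
  | _, [], s => s
  | prev, x :: rs, s => pvCore x rs (pvCoreStep prev x s)

lemma pvStep_eq (report : List Int) (i prev x y : Int) (s : Bool × Bool × Int × Int × Int)
    (hi : i ≠ 0)
    (h1 : PySem.List.pyGetD report i 0 = x)
    (h2 : PySem.List.pyGetD report (i - 1) 0 = prev) :
    pvCheckStep report s (i, y) = pvCoreStep prev x s := by
  obtain ⟨sd, noob, asc, desc, oob⟩ := s
  simp [pvCheckStep, pvCoreStep, hi, h1, h2]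

lemma pvFold_core (rest : List Int) : ∀ (pre : List Int) (prev : Int)
    (s : Bool × Bool × Int × Int × Int),
    (PySem.List.enumerate rest ((pre.length : Int) + 1)).foldl
      (pvCheckStep (pre ++ prev :: rest)) s = pvCore prev rest s := by
  induction rest with
  | nil => intro pre prev s; simp [PySem.List.enumerate_nil, pvCore]
  | cons x rs ih =>
    intro pre prev s
    rw [PySem.List.enumerate_cons, List.foldl_cons]
    rw [pvStep_eq (pre ++ prev :: x :: rs) ((pre.length : Int) + 1) prev x x s
      (by positivity)
      (by
        have : ((pre.length : Int) + 1) = ((pre.length + 1 : Nat) : Int) := by omega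
        rw [this, PySem.List.pyGetD_natCast]
        simp [List.getD])
      (by
        have : ((pre.length : Int) + 1 - 1) = ((pre.length : Nat) : Int) := by omega
        rw [this, PySem.List.pyGetD_natCast]
        simp [List.getD])]
    have hre : pre ++ prev :: x :: rs = (pre ++ [prev]) ++ x :: rs := by simp
    have hlen : (pre.length : Int) + 1 + 1 = ((pre ++ [prev]).length : Int) + 1 := by
      simp
    rw [hre, hlen, ih (pre ++ [prev]) x (pvCoreStep prev x s)]
    rfl

-- counts over the adjacent-difference list
def pvDiffs (prev : Int) (rest : List Int) : List Int :=
  List.zipWith (fun a b => b - a) (prev :: rest) rest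

def pvP (l : List Int) : Int := (l.countP fun d => decide (0 < d) : Nat)
def pvN (l : List Int) : Int := (l.countP fun d => decide (d < 0) : Nat)
def pvB (l : List Int) : Int := (l.countP fun d => decide (d = 0 ∨ d < -3 ∨ 3 < d) : Nat)

lemma pvP_nonneg (l : List Int) : 0 ≤ pvP l := Int.natCast_nonneg _
lemma pvN_nonneg (l : List Int) : 0 ≤ pvN l := Int.natCast_nonneg _
lemma pvB_nonneg (l : List Int) : 0 ≤ pvB l := Int.natCast_nonneg _

lemma pvCore_spec (rest : List Int) : ∀ (prev : Int) (sd noob : Bool) (asc desc oob : Int),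
    (0 < asc → 0 < desc → sd = false) → (0 < oob → noob = false) →
    0 ≤ asc → 0 ≤ desc → 0 ≤ oob →
    pvCore prev rest (sd, noob, asc, desc, oob) =
      ((if 0 < asc + pvP (pvDiffs prev rest) ∧ 0 < desc + pvN (pvDiffs prev rest) then false else sd),
       (if 0 < oob + pvB (pvDiffs prev rest) then false else noob),
       asc + pvP (pvDiffs prev rest), desc + pvN (pvDiffs prev rest), oob + pvB (pvDiffs prev rest)) := by
  induction rest with
  | nil =>
    intro prev sd noob asc desc oob h1 h2 ha hd ho
    simp only [pvCore, pvDiffs, List.zipWith_nil_right, pvP, pvN, pvB, List.countP_nil,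
      Nat.cast_zero, add_zero]
    have e1 : (if 0 < asc ∧ 0 < desc then false else sd) = sd := by
      by_cases c : 0 < asc ∧ 0 < desc
      · rw [if_pos c, h1 c.1 c.2]
      · rw [if_neg c]
    have e2 : (if 0 < oob then false else noob) = noob := by
      by_cases c : 0 < oob
      · rw [if_pos c, h2 c]
      · rw [if_neg c]
    rw [e1, e2]
  | cons x rs ih =>
    intro prev sd noob asc desc oob h1 h2 ha hd ho
    have hPn := pvP_nonneg (pvDiffs x rs)
    have hNn := pvN_nonneg (pvDiffs x rs)
    have hBn := pvB_nonneg (pvDiffs x rs)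
    have hdc : pvDiffs prev (x :: rs) = (x - prev) :: pvDiffs x rs := rfl
    rcases lt_trichotomy prev x with h | h | h
    · -- ascending step
      have hP : pvP (pvDiffs prev (x :: rs)) = pvP (pvDiffs x rs) + 1 := by
        simp [pvP, hdc, List.countP_cons]; omega
      have hN : pvN (pvDiffs prev (x :: rs)) = pvN (pvDiffs x rs) := by
        simp [pvN, hdc, List.countP_cons]; omega
      by_cases hb : 3 < x - prev
      · have hB : pvB (pvDiffs prev (x :: rs)) = pvB (pvDiffs x rs) + 1 := by
          simp [pvB, hdc, show x - prev = 0 ∨ x - prev < -3 ∨ 3 < x - prev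
            from Or.inr (Or.inr hb)]
        have hstep : pvCoreStep prev x (sd, noob, asc, desc, oob) =
            ((if 0 < asc + 1 ∧ 0 < desc then false else sd), false, asc + 1, desc, oob + 1) := by
          simp only [pvCoreStep, gt_iff_lt]
          rw [if_pos h, if_pos (by omega : x - prev < 1 ∨ 3 < x - prev),
            if_neg (by omega : ¬ x < prev), if_neg (by omega : ¬ x - prev = 0),
            if_pos (by omega : oob + 1 > 0)]
        rw [pvCore, hstep, ih x _ _ (asc + 1) desc (oob + 1)
          (by intro p q; rw [if_pos ⟨p, q⟩]) (by intro _; rfl) (by omega) (by omega) (by omega),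
          hP, hN, hB]
        have f1 : (if 0 < asc + 1 + pvP (pvDiffs x rs) ∧ 0 < desc + pvN (pvDiffs x rs) then false
              else if 0 < asc + 1 ∧ 0 < desc then false else sd)
            = (if 0 < asc + (pvP (pvDiffs x rs) + 1) ∧ 0 < desc + pvN (pvDiffs x rs) then false else sd) := by
          by_cases c : 0 < asc + (pvP (pvDiffs x rs) + 1) ∧ 0 < desc + pvN (pvDiffs x rs)
          · rw [if_pos (show 0 < asc + 1 + pvP (pvDiffs x rs) ∧ 0 < desc + pvN (pvDiffs x rs) by omega), if_pos c]
          · rw [if_neg (show ¬ (0 < asc + 1 + pvP (pvDiffs x rs) ∧ 0 < desc + pvN (pvDiffs x rs)) by omega),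
              if_neg c, if_neg (show ¬ (0 < asc + 1 ∧ 0 < desc) by omega)]
        have f2 : (if 0 < oob + 1 + pvB (pvDiffs x rs) then false else false)
            = (if 0 < oob + (pvB (pvDiffs x rs) + 1) then false else noob) := by
          rw [if_pos (show 0 < oob + 1 + pvB (pvDiffs x rs) by omega),
            if_pos (show 0 < oob + (pvB (pvDiffs x rs) + 1) by omega)]
        rw [f1, f2, show asc + 1 + pvP (pvDiffs x rs) = asc + (pvP (pvDiffs x rs) + 1) by ring,
          show oob + 1 + pvB (pvDiffs x rs) = oob + (pvB (pvDiffs x rs) + 1) by ring]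
      · have hB : pvB (pvDiffs prev (x :: rs)) = pvB (pvDiffs x rs) := by
          simp [pvB, hdc, show ¬ (x - prev = 0 ∨ x - prev < -3 ∨ 3 < x - prev) by omega]
        have hstep : pvCoreStep prev x (sd, noob, asc, desc, oob) =
            ((if 0 < asc + 1 ∧ 0 < desc then false else sd),
             (if 0 < oob then false else noob), asc + 1, desc, oob) := by
          simp only [pvCoreStep, gt_iff_lt]
          rw [if_pos h, if_neg (by omega : ¬ (x - prev < 1 ∨ 3 < x - prev)),
            if_neg (by omega : ¬ x < prev), if_neg (by omega : ¬ x - prev = 0)]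
        rw [pvCore, hstep, ih x _ _ (asc + 1) desc oob
          (by intro p q; rw [if_pos ⟨p, q⟩]) (by intro p; rw [if_pos p]) (by omega) (by omega) ho,
          hP, hN, hB]
        have f1 : (if 0 < asc + 1 + pvP (pvDiffs x rs) ∧ 0 < desc + pvN (pvDiffs x rs) then false
              else if 0 < asc + 1 ∧ 0 < desc then false else sd)
            = (if 0 < asc + (pvP (pvDiffs x rs) + 1) ∧ 0 < desc + pvN (pvDiffs x rs) then false else sd) := by
          by_cases c : 0 < asc + (pvP (pvDiffs x rs) + 1) ∧ 0 < desc + pvN (pvDiffs x rs)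
          · rw [if_pos (show 0 < asc + 1 + pvP (pvDiffs x rs) ∧ 0 < desc + pvN (pvDiffs x rs) by omega), if_pos c]
          · rw [if_neg (show ¬ (0 < asc + 1 + pvP (pvDiffs x rs) ∧ 0 < desc + pvN (pvDiffs x rs)) by omega),
              if_neg c, if_neg (show ¬ (0 < asc + 1 ∧ 0 < desc) by omega)]
        have f2 : (if 0 < oob + pvB (pvDiffs x rs) then false else if 0 < oob then false else noob)
            = (if 0 < oob + pvB (pvDiffs x rs) then false else noob) := by
          by_cases c : 0 < oob + pvB (pvDiffs x rs)
          · rw [if_pos c, if_pos c]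
          · rw [if_neg c, if_neg c, if_neg (show ¬ 0 < oob by omega)]
        rw [f1, f2, show asc + 1 + pvP (pvDiffs x rs) = asc + (pvP (pvDiffs x rs) + 1) by ring]
    · -- equal step (difference = 0)
      have hP : pvP (pvDiffs prev (x :: rs)) = pvP (pvDiffs x rs) := by
        simp [pvP, hdc, List.countP_cons]; omega
      have hN : pvN (pvDiffs prev (x :: rs)) = pvN (pvDiffs x rs) := by
        simp [pvN, hdc, List.countP_cons]; omega
      have hB : pvB (pvDiffs prev (x :: rs)) = pvB (pvDiffs x rs) + 1 := by
        simp [pvB, hdc, show x - prev = 0 ∨ x - prev < -3 ∨ 3 < x - prev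
          from Or.inl (by omega)]
      have hstep : pvCoreStep prev x (sd, noob, asc, desc, oob) =
          ((if 0 < asc ∧ 0 < desc then false else sd), false, asc, desc, oob + 1) := by
        simp only [pvCoreStep, gt_iff_lt]
        rw [if_neg (by omega : ¬ prev < x), if_neg (by omega : ¬ x < prev),
          if_pos (by omega : x - prev = 0), if_pos (by omega : oob + 1 > 0)]
      rw [pvCore, hstep, ih x _ _ asc desc (oob + 1)
        (by intro p q; rw [if_pos ⟨p, q⟩]) (by intro _; rfl) ha hd (by omega),
        hP, hN, hB]
      have f1 : (if 0 < asc + pvP (pvDiffs x rs) ∧ 0 < desc + pvN (pvDiffs x rs) then false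
            else if 0 < asc ∧ 0 < desc then false else sd)
          = (if 0 < asc + pvP (pvDiffs x rs) ∧ 0 < desc + pvN (pvDiffs x rs) then false else sd) := by
        by_cases c : 0 < asc + pvP (pvDiffs x rs) ∧ 0 < desc + pvN (pvDiffs x rs)
        · rw [if_pos c, if_pos c]
        · rw [if_neg c, if_neg c, if_neg (show ¬ (0 < asc ∧ 0 < desc) by omega)]
      have f2 : (if 0 < oob + 1 + pvB (pvDiffs x rs) then false else false)
          = (if 0 < oob + (pvB (pvDiffs x rs) + 1) then false else noob) := by
        rw [if_pos (show 0 < oob + 1 + pvB (pvDiffs x rs) by omega),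
          if_pos (show 0 < oob + (pvB (pvDiffs x rs) + 1) by omega)]
      rw [f1, f2, show oob + 1 + pvB (pvDiffs x rs) = oob + (pvB (pvDiffs x rs) + 1) by ring]
    · -- descending step
      have hP : pvP (pvDiffs prev (x :: rs)) = pvP (pvDiffs x rs) := by
        simp [pvP, hdc, List.countP_cons]; omega
      have hN : pvN (pvDiffs prev (x :: rs)) = pvN (pvDiffs x rs) + 1 := by
        simp [pvN, hdc, List.countP_cons]; omega
      have habs : |x - prev| = -(x - prev) := abs_of_neg (by omega)
      by_cases hb : x - prev < -3
      · have hB : pvB (pvDiffs prev (x :: rs)) = pvB (pvDiffs x rs) + 1 := by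
          simp [pvB, hdc, show x - prev = 0 ∨ x - prev < -3 ∨ 3 < x - prev
            from Or.inr (Or.inl hb)]
        have hstep : pvCoreStep prev x (sd, noob, asc, desc, oob) =
            ((if 0 < asc ∧ 0 < desc + 1 then false else sd), false, asc, desc + 1, oob + 1) := by
          simp only [pvCoreStep, gt_iff_lt, habs]
          rw [if_neg (by omega : ¬ prev < x), if_pos (by omega : x < prev),
            if_pos (by omega : -(x - prev) < 1 ∨ 3 < -(x - prev)),
            if_neg (by omega : ¬ x - prev = 0), if_pos (by omega : oob + 1 > 0)]
        rw [pvCore, hstep, ih x _ _ asc (desc + 1) (oob + 1)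
          (by intro p q; rw [if_pos ⟨p, q⟩]) (by intro _; rfl) ha (by omega) (by omega),
          hP, hN, hB]
        have f1 : (if 0 < asc + pvP (pvDiffs x rs) ∧ 0 < desc + 1 + pvN (pvDiffs x rs) then false
              else if 0 < asc ∧ 0 < desc + 1 then false else sd)
            = (if 0 < asc + pvP (pvDiffs x rs) ∧ 0 < desc + (pvN (pvDiffs x rs) + 1) then false else sd) := by
          by_cases c : 0 < asc + pvP (pvDiffs x rs) ∧ 0 < desc + (pvN (pvDiffs x rs) + 1)
          · rw [if_pos (show 0 < asc + pvP (pvDiffs x rs) ∧ 0 < desc + 1 + pvN (pvDiffs x rs) by omega), if_pos c]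
          · rw [if_neg (show ¬ (0 < asc + pvP (pvDiffs x rs) ∧ 0 < desc + 1 + pvN (pvDiffs x rs)) by omega),
              if_neg c, if_neg (show ¬ (0 < asc ∧ 0 < desc + 1) by omega)]
        have f2 : (if 0 < oob + 1 + pvB (pvDiffs x rs) then false else false)
            = (if 0 < oob + (pvB (pvDiffs x rs) + 1) then false else noob) := by
          rw [if_pos (show 0 < oob + 1 + pvB (pvDiffs x rs) by omega),
            if_pos (show 0 < oob + (pvB (pvDiffs x rs) + 1) by omega)]
        rw [f1, f2, show desc + 1 + pvN (pvDiffs x rs) = desc + (pvN (pvDiffs x rs) + 1) by ring,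
          show oob + 1 + pvB (pvDiffs x rs) = oob + (pvB (pvDiffs x rs) + 1) by ring]
      · have hB : pvB (pvDiffs prev (x :: rs)) = pvB (pvDiffs x rs) := by
          simp [pvB, hdc, show ¬ (x - prev = 0 ∨ x - prev < -3 ∨ 3 < x - prev) by omega]
        have hstep : pvCoreStep prev x (sd, noob, asc, desc, oob) =
            ((if 0 < asc ∧ 0 < desc + 1 then false else sd),
             (if 0 < oob then false else noob), asc, desc + 1, oob) := by
          simp only [pvCoreStep, gt_iff_lt, habs]
          rw [if_neg (by omega : ¬ prev < x), if_pos (by omega : x < prev),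
            if_neg (by omega : ¬ (-(x - prev) < 1 ∨ 3 < -(x - prev))),
            if_neg (by omega : ¬ x - prev = 0)]
        rw [pvCore, hstep, ih x _ _ asc (desc + 1) oob
          (by intro p q; rw [if_pos ⟨p, q⟩]) (by intro p; rw [if_pos p]) ha (by omega) ho,
          hP, hN, hB]
        have f1 : (if 0 < asc + pvP (pvDiffs x rs) ∧ 0 < desc + 1 + pvN (pvDiffs x rs) then false
              else if 0 < asc ∧ 0 < desc + 1 then false else sd)
            = (if 0 < asc + pvP (pvDiffs x rs) ∧ 0 < desc + (pvN (pvDiffs x rs) + 1) then false else sd) := by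
          by_cases c : 0 < asc + pvP (pvDiffs x rs) ∧ 0 < desc + (pvN (pvDiffs x rs) + 1)
          · rw [if_pos (show 0 < asc + pvP (pvDiffs x rs) ∧ 0 < desc + 1 + pvN (pvDiffs x rs) by omega), if_pos c]
          · rw [if_neg (show ¬ (0 < asc + pvP (pvDiffs x rs) ∧ 0 < desc + 1 + pvN (pvDiffs x rs)) by omega),
              if_neg c, if_neg (show ¬ (0 < asc ∧ 0 < desc + 1) by omega)]
        have f2 : (if 0 < oob + pvB (pvDiffs x rs) then false else if 0 < oob then false else noob)
            = (if 0 < oob + pvB (pvDiffs x rs) then false else noob) := by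
          by_cases c : 0 < oob + pvB (pvDiffs x rs)
          · rw [if_pos c, if_pos c]
          · rw [if_neg c, if_neg c, if_neg (show ¬ 0 < oob by omega)]
        rw [f1, f2, show desc + 1 + pvN (pvDiffs x rs) = desc + (pvN (pvDiffs x rs) + 1) by ring]

-- per-report equivalence of the two safety judgements
lemma pvSafe_eq (r : List Int) :
    ((check_report_safety r).1 && (check_report_safety r).2) = pvAltSafe r := by
  cases r with
  | nil => simp [check_report_safety, pvAltSafe, PySem.List.enumerate_nil]
  | cons h t =>
    have hinit : pvCheckStep (h :: t) (true, true, 0, 0, 0) (0, h) = (true, true, 0, 0, 0) := by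
      simp [pvCheckStep]
    have hfold : check_report_safety (h :: t) =
        ((pvCore h t (true, true, 0, 0, 0)).1, (pvCore h t (true, true, 0, 0, 0)).2.1) := by
      unfold check_report_safety
      rw [PySem.List.enumerate_cons, List.foldl_cons, hinit]
      have hfc := pvFold_core t [] h (true, true, 0, 0, 0)
      simp only [List.nil_append, List.length_nil, Nat.cast_zero, zero_add] at hfc
      simp only [zero_add]
      rw [hfc]
    rw [hfold, pvCore_spec t h true true 0 0 0 (by omega) (by omega) le_rfl le_rfl le_rfl]
    have hPn := pvP_nonneg (pvDiffs h t)
    have hNn := pvN_nonneg (pvDiffs h t)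
    have hBn := pvB_nonneg (pvDiffs h t)
    have htail : (h :: t).tail = t := rfl
    have hall1 : (pvDiffs h t).all (fun d => decide (1 ≤ d ∧ d ≤ 3)) = true ↔
        ∀ d ∈ pvDiffs h t, 1 ≤ d ∧ d ≤ 3 := by simp [List.all_eq_true]
    have hall2 : (pvDiffs h t).all (fun d => decide (-3 ≤ d ∧ d ≤ -1)) = true ↔
        ∀ d ∈ pvDiffs h t, -3 ≤ d ∧ d ≤ -1 := by simp [List.all_eq_true]
    have hPpos : 0 < pvP (pvDiffs h t) ↔ ∃ d ∈ pvDiffs h t, 0 < d := by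
      simp [pvP, List.countP_pos_iff]
    have hNpos : 0 < pvN (pvDiffs h t) ↔ ∃ d ∈ pvDiffs h t, d < 0 := by
      simp [pvN, List.countP_pos_iff]
    have hBpos : 0 < pvB (pvDiffs h t) ↔ ∃ d ∈ pvDiffs h t, d = 0 ∨ d < -3 ∨ 3 < d := by
      simp [pvB, List.countP_pos_iff]
    show ((if 0 < 0 + pvP (pvDiffs h t) ∧ 0 < 0 + pvN (pvDiffs h t) then false else true) &&
        (if 0 < 0 + pvB (pvDiffs h t) then false else true)) = pvAltSafe (h :: t)
    unfold pvAltSafe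
    rw [htail]
    show _ = ((pvDiffs h t).all (fun d => decide (1 ≤ d ∧ d ≤ 3)) ||
        (pvDiffs h t).all (fun d => decide (-3 ≤ d ∧ d ≤ -1)))
    by_cases c1 : 0 < pvP (pvDiffs h t) ∧ 0 < pvN (pvDiffs h t)
    · rw [if_pos (by omega : 0 < 0 + pvP (pvDiffs h t) ∧ 0 < 0 + pvN (pvDiffs h t))]
      simp only [Bool.false_and]
      obtain ⟨dp, hdp, hdp0⟩ := hPpos.mp c1.1
      obtain ⟨dn, hdn, hdn0⟩ := hNpos.mp c1.2
      symm
      simp only [Bool.or_eq_false_iff]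
      constructor
      · rw [Bool.eq_false_iff, Ne, hall1]
        intro hc; have := hc dn hdn; omega
      · rw [Bool.eq_false_iff, Ne, hall2]
        intro hc; have := hc dp hdp; omega
    · rw [if_neg (by omega : ¬ (0 < 0 + pvP (pvDiffs h t) ∧ 0 < 0 + pvN (pvDiffs h t)))]
      by_cases c2 : 0 < pvB (pvDiffs h t)
      · rw [if_pos (by omega : 0 < 0 + pvB (pvDiffs h t))]
        simp only [Bool.true_and]
        obtain ⟨db, hdb, hdb0⟩ := hBpos.mp c2
        symm
        simp only [Bool.or_eq_false_iff]
        constructor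
        · rw [Bool.eq_false_iff, Ne, hall1]
          intro hc; have := hc db hdb; omega
        · rw [Bool.eq_false_iff, Ne, hall2]
          intro hc; have := hc db hdb; omega
      · rw [if_neg (by omega : ¬ (0 < 0 + pvB (pvDiffs h t)))]
        simp only [Bool.true_and]
        have hgood : ∀ d ∈ pvDiffs h t, d ≠ 0 ∧ -3 ≤ d ∧ d ≤ 3 := by
          intro d hd
          by_contra hc
          exact c2 (hBpos.mpr ⟨d, hd, by omega⟩)
        symm
        by_cases cp : ∃ d ∈ pvDiffs h t, 0 < d
        · -- no negative diff, so all diffs lie in [1,3]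
          have hnon : ¬ ∃ d ∈ pvDiffs h t, d < 0 := fun hn =>
            c1 ⟨hPpos.mpr cp, hNpos.mpr hn⟩
          rw [Bool.or_eq_true_iff]
          left
          rw [hall1]
          intro d hd
          have h1 := hgood d hd
          have h2 : ¬ d < 0 := fun hdlt => hnon ⟨d, hd, hdlt⟩
          omega
        · rw [Bool.or_eq_true_iff]
          right
          rw [hall2]
          intro d hd
          have h1 := hgood d hd
          have h2 : ¬ 0 < d := fun hdp => cp ⟨d, hd, hdp⟩
          omega

-- partition lemma for A's outer accumulator loop
lemma pvPartition (p : List Int → Bool) (xs : List (List Int)) :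
    ∀ (g b : List (List Int)),
    xs.foldl (fun acc line => if p line then (acc.1 ++ [line], acc.2) else (acc.1, acc.2 ++ [line])) (g, b)
      = (g ++ xs.filter p, b ++ xs.filter (fun x => !p x)) := by
  induction xs with
  | nil => intro g b; simp
  | cons x xs ih =>
    intro g b
    by_cases h : p x <;> simp [h, ih]

-- ===== VERDICT (by name: the statement is the Claim_ definition above) =====
theorem collect_safe_and_unsafe_reports_spec : Claim_equal_collect_safe_and_unsafe_reports := by
  intro xs _
  unfold Spec_collect_safe_and_unsafe_reports collect_safe_and_unsafe_reports collect_safe_and_unsafe_reports_alt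
  have hp := pvPartition (fun line => (check_report_safety line).1 && (check_report_safety line).2) xs [] []
  simp only [List.nil_append] at hp
  rw [hp]
  have h1 : xs.filter (fun line => (check_report_safety line).1 && (check_report_safety line).2)
      = xs.filter pvAltSafe :=
    List.filter_congr (fun x _ => pvSafe_eq x)
  have h2 : xs.filter (fun x => !((check_report_safety x).1 && (check_report_safety x).2))
      = xs.filter (fun r => !pvAltSafe r) :=
    List.filter_congr (fun x _ => by rw [pvSafe_eq x])
  rw [h1, h2]
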